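-- pv_equiv track=rewrite | github.com/Daivik1205/GreenSync | routing_dashboard.py | _routing_advice
-- ===== SOURCE A (Python) =====
-- def _routing_advice(zone_states: dict) -> list[str]:
--     """
--     Simple rule-based routing advice derived from zone states.
--     Will be replaced by GRU + LSH predictions in Phase 6.
--     """
--     avoid  = [zid for zid, z in zone_states.items() if z.get("event") == "congestion"]
--     slow   = [zid for zid, z in zone_states.items() if z.get("event") == "slowdown"]
--     clear  = [zid for zid, z in zone_states.items() if z.get("event") == "free_flow"]
--
--     advice = []
--
--     if avoid:
--         advice.append(f"  🔴 AVOID  → {', '.join(sorted(avoid)[:5])}"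
--                       + (" …" if len(avoid) > 5 else ""))
--     if slow:
--         advice.append(f"  🟡 CAUTION → {', '.join(sorted(slow)[:5])}"
--                       + (" …" if len(slow) > 5 else ""))
--     if clear:
--         advice.append(f"  🟢 CLEAR  → {', '.join(sorted(clear)[:5])}"
--                       + (" …" if len(clear) > 5 else ""))
--
--     if not advice:
--         advice.append("  ⏳  Waiting for simulation data …")
--
--     return advice
-- ===== SOURCE B (Python) =====
-- def _routing_advice(zone_states: dict) -> list[str]:
--     """One grouping pass + config-driven formatting loop."""
--     pairs = [(z.get("event"), zid) for zid, z in zone_states.items()]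
--     groups = {}
--     for ev, zid in pairs:
--         groups.setdefault(ev, []).append(zid)
--
--     config = [
--         ("congestion", "  \U0001F534 AVOID  \u2192 "),
--         ("slowdown",   "  \U0001F7E1 CAUTION \u2192 "),
--         ("free_flow",  "  \U0001F7E2 CLEAR  \u2192 "),
--     ]
--
--     advice = []
--     for key, prefix in config:
--         bucket = groups.get(key, [])
--         if bucket:
--             advice.append(prefix + ", ".join(sorted(bucket)[:5])
--                           + (" \u2026" if len(bucket) > 5 else ""))
--
--     if not advice:
--         advice.append("  \u23F3  Waiting for simulation data \u2026")
--     return advice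
-- ===== Notes on version B (the rewrite author's own statement) =====
-- stated objective: simpler
-- what changed: Replaces three separate scans of zone_states (one per event kind) plus three hand-written formatting branches with a single grouping pass into an event->zones dict followed by one config-driven loop over (event, prefix) pairs.
import Mathlib
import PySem

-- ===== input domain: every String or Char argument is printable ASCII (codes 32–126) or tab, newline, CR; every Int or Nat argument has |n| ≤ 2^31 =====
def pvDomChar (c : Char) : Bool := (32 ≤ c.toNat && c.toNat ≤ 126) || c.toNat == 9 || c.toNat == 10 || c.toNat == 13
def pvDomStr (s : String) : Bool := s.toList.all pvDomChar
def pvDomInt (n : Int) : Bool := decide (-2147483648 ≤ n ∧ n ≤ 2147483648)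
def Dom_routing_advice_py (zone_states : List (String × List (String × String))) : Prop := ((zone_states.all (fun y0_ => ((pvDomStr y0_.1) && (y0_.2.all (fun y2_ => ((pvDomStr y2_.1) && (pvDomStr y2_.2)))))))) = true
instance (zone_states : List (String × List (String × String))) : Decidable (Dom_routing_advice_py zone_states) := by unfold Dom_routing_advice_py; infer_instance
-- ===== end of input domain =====

-- B replaces A's three separate scans of zone_states and three hand-written branches with one
-- grouping pass (event -> zone ids) and one config-driven formatting loop (objective: simpler).

-- ===== PORT A =====
-- three comprehensions, each a full scan filtering on z.get("event")
def routing_advice_py (zone_states : List (String × List (String × String))) : List String :=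
  let avoid := (zone_states.filter (fun p => (PySem.Dict.mk p.2).get? "event" == some "congestion")).map (fun p => p.1)
  let slow  := (zone_states.filter (fun p => (PySem.Dict.mk p.2).get? "event" == some "slowdown")).map (fun p => p.1)
  let clear := (zone_states.filter (fun p => (PySem.Dict.mk p.2).get? "event" == some "free_flow")).map (fun p => p.1)
  let advice : List String := []
  let advice := if avoid ≠ [] then
      advice ++ ["  🔴 AVOID  → " ++ PySem.Str.join ", " ((PySem.List.sorted avoid (fun x => x) false).take 5)
                 ++ (if avoid.length > 5 then " …" else "")]
    else advice
  let advice := if slow ≠ [] then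
      advice ++ ["  🟡 CAUTION → " ++ PySem.Str.join ", " ((PySem.List.sorted slow (fun x => x) false).take 5)
                 ++ (if slow.length > 5 then " …" else "")]
    else advice
  let advice := if clear ≠ [] then
      advice ++ ["  🟢 CLEAR  → " ++ PySem.Str.join ", " ((PySem.List.sorted clear (fun x => x) false).take 5)
                 ++ (if clear.length > 5 then " …" else "")]
    else advice
  if advice = [] then advice ++ ["  ⏳  Waiting for simulation data …"] else advice

-- ===== PORT B =====
-- one grouping pass over (event, zid) pairs, then one loop over the (event, prefix) config
def routing_advice_py_alt (zone_states : List (String × List (String × String))) : List String :=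
  let pairs := zone_states.map (fun p => ((PySem.Dict.mk p.2).get? "event", p.1))
  let groups : PySem.Dict (Option String) (List String) :=
    pairs.foldl (fun d q => d.modify q.1 [] (fun l => l ++ [q.2])) PySem.Dict.empty
  let config : List (String × String) :=
    [("congestion", "  🔴 AVOID  → "),
     ("slowdown",   "  🟡 CAUTION → "),
     ("free_flow",  "  🟢 CLEAR  → ")]
  let advice := config.foldl (fun acc c =>
      let bucket := groups.getD (some c.1) []
      if bucket ≠ [] then
        acc ++ [c.2 ++ PySem.Str.join ", " ((PySem.List.sorted bucket (fun x => x) false).take 5)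
                ++ (if bucket.length > 5 then " …" else "")]
      else acc) []
  if advice = [] then advice ++ ["  ⏳  Waiting for simulation data …"] else advice

-- ===== PRECONDITION & SPEC =====
def Spec_routing_advice_py (zone_states : List (String × List (String × String))) (out : List String) : Prop := out = routing_advice_py_alt zone_states
instance (zone_states : List (String × List (String × String))) (out : List String) : Decidable (Spec_routing_advice_py zone_states out) := by unfold Spec_routing_advice_py; infer_instance

-- ===== CLAIM (what is proved, stated in full; the proofs are below) =====
def Claim_equal_routing_advice_py : Prop := ∀ (zone_states : List (String × List (String × String))), Dom_routing_advice_py zone_states → Spec_routing_advice_py zone_states (routing_advice_py zone_states)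

-- ===== LEMMAS AND PROOFS =====

-- B's bucket for event key k is exactly A's comprehension for that key.
theorem pv_bucket_eq (zone_states : List (String × List (String × String))) (k : String) :
    ((zone_states.map (fun p => ((PySem.Dict.mk p.2).get? "event", p.1))).foldl
        (fun d q => d.modify q.1 [] (fun l => l ++ [q.2])) PySem.Dict.empty).getD (some k) []
    = (zone_states.filter (fun p => (PySem.Dict.mk p.2).get? "event" == some k)).map (fun p => p.1) := by
  rw [PySem.Dict.getD_foldl_modify_append]
  simp [List.filter_map, Function.comp_def]

-- ===== VERDICT (by name: the statement is the Claim_ definition above) =====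
theorem routing_advice_py_spec : Claim_equal_routing_advice_py := by
  intro zs _
  show routing_advice_py zs = routing_advice_py_alt zs
  unfold routing_advice_py routing_advice_py_alt
  simp only [List.foldl_cons, List.foldl_nil, pv_bucket_eq]
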